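-- pv_equiv track=rewrite | github.com/MichaelKhaykin/pl-ucb-cs61b | questions/Q2/server.py | calculate_k
-- ===== SOURCE A (Python) =====
-- def calculate_k(input_list):
--     sorted_input_dict = dict()
--     for i, value in enumerate(sorted(input_list)):
--         sorted_input_dict[value] = i
--     max_k = 0
--     for i in range(len(input_list)):
--         max_k = max(max_k, abs(i - sorted_input_dict[input_list[i]]))
--     return max_k
-- ===== SOURCE B (Python) =====
-- def calculate_k(input_list):
--     m = 0
--     for i, v in enumerate(input_list):
--         rank = sum(1 for x in input_list if x <= v) - 1
--         m = max(m, abs(i - rank))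
--     return m
-- ===== Notes on version B (the rewrite author's own statement) =====
-- stated objective: alternative
-- what changed: Replaces sort + last-index dict with a direct counting rule: each element's sorted position is (number of elements <= it) - 1, computed by a plain scan per element; no sorting, no dict.
import Mathlib
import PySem

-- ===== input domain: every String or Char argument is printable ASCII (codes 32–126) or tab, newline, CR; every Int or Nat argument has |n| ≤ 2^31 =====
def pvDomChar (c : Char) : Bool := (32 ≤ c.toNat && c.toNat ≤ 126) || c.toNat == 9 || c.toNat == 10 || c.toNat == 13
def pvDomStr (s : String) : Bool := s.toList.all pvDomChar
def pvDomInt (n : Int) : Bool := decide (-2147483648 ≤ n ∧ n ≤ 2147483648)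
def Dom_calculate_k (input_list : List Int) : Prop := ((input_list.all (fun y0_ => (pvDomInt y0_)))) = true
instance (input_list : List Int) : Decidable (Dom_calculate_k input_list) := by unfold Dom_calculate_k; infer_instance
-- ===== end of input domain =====

-- B replaces A's sort + last-index dict by a per-element count of elements ≤ it (alternative decomposition, not faster).

-- ===== PORT A =====
-- d[input_list[i]] always succeeds (the key is in the dict, built from a permutation of input_list),
-- so getD … 0 is exact here; likewise input_list[i] is always in range, so pyGetD … 0 is exact.
def calculate_k (input_list : List Int) : Int :=
  let sorted_input_dict :=
    (PySem.List.enumerate (PySem.List.sorted input_list (fun x => x) false) 0).foldl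
      (fun d p => d.insert p.2 p.1) (PySem.Dict.empty : PySem.Dict Int Int)
  (PySem.List.pyRange 0 (PySem.List.len input_list) 1).foldl
    (fun max_k i => max max_k |i - sorted_input_dict.getD (PySem.List.pyGetD input_list i 0) 0|) 0

-- ===== PORT B =====
def calculate_k_alt (input_list : List Int) : Int :=
  (PySem.List.enumerate input_list 0).foldl
    (fun m p =>
      let rank := (input_list.map (fun x => if x ≤ p.2 then (1 : Int) else 0)).sum - 1
      max m |p.1 - rank|) 0

-- ===== PRECONDITION & SPEC =====
def Spec_calculate_k (input_list : List Int) (out : Int) : Prop := out = calculate_k_alt input_list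
instance (input_list : List Int) (out : Int) : Decidable (Spec_calculate_k input_list out) := by unfold Spec_calculate_k; infer_instance

-- ===== CLAIM (what is proved, stated in full; the proofs are below) =====
def Claim_equal_calculate_k : Prop := ∀ (input_list : List Int), Dom_calculate_k input_list → Spec_calculate_k input_list (calculate_k input_list)

-- ===== LEMMAS AND PROOFS =====

-- the enumerate-insert loop never touches a key not in s
lemma dict_loop_not_mem (s : List Int) (k : Int) (d0 : PySem.Dict Int Int) (v : Int)
    (hv : v ∉ s) :
    ((PySem.List.enumerate s k).foldl (fun d p => d.insert p.2 p.1) d0).getD v 0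
      = d0.getD v 0 := by
  induction s generalizing k d0 with
  | nil => simp [PySem.List.enumerate_nil]
  | cons a t ih =>
    simp only [PySem.List.enumerate_cons, List.foldl_cons]
    rw [ih _ _ (fun h => hv (List.mem_cons_of_mem _ h)),
        PySem.Dict.getD_insert]
    have hne : v ≠ a := fun h => hv (by rw [h]; exact List.mem_cons_self)
    simp [hne]

-- in a ≤-sorted list s, the last-write-wins dict maps v to k + (#elements ≤ v) - 1
lemma dict_loop_lookup (s : List Int) (k : Int) (d0 : PySem.Dict Int Int) (v : Int)
    (hs : s.Pairwise (fun a b => a ≤ b)) (hv : v ∈ s) :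
    ((PySem.List.enumerate s k).foldl (fun d p => d.insert p.2 p.1) d0).getD v 0
      = k + (s.countP (fun x => decide (x ≤ v)) : Int) - 1 := by
  induction s generalizing k d0 with
  | nil => cases hv
  | cons a t ih =>
    simp only [PySem.List.enumerate_cons, List.foldl_cons]
    rcases List.pairwise_cons.mp hs with ⟨hle, ht⟩
    by_cases hvt : v ∈ t
    · rw [ih _ _ ht hvt]
      have : a ≤ v := hle v hvt
      simp only [List.countP_cons, this, decide_true]
      push_cast
      ring
    · have hva : v = a := by
        rcases List.mem_cons.mp hv with h | h
        · exact h
        · exact absurd h hvt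
      subst hva
      rw [dict_loop_not_mem t (k + 1) _ v hvt, PySem.Dict.getD_insert]
      have hcz : t.countP (fun x => decide (x ≤ v)) = 0 := by
        rw [List.countP_eq_zero]
        intro x hx
        have h1 : v ≤ x := hle x hx
        have h2 : x ≠ v := by
          intro h
          rw [← h] at hvt
          exact hvt hx
        simp
        omega
      simp [hcz]

lemma count_le_eq_sum (xs : List Int) (v : Int) :
    ((xs.map (fun x => if x ≤ v then (1 : Int) else 0)).sum)
      = (xs.countP (fun x => decide (x ≤ v)) : Int) := by
  induction xs with
  | nil => simp
  | cons a t ih =>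
    simp only [List.map_cons, List.sum_cons, List.countP_cons, ih]
    by_cases h : a ≤ v <;> simp [h, Int.add_comm]

-- ===== VERDICT (by name: the statement is the Claim_ definition above) =====
theorem calculate_k_spec : Claim_equal_calculate_k := by
  intro xs _
  unfold Spec_calculate_k calculate_k calculate_k_alt
  conv_rhs => rw [PySem.List.enumerate_eq_map_pyRange (d := (0 : Int)), List.foldl_map]
  simp only [PySem.List.len_eq]
  apply PySem.List.foldl_congr_mem
  intro m i hi
  rcases (PySem.List.mem_pyRange_one).mp hi with ⟨h0, hlt⟩
  have hmem : PySem.List.pyGetD xs i 0 ∈ xs := by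
    rw [PySem.List.pyGetD_eq_getElem xs 0 h0 (by simpa using hlt)]
    exact List.getElem_mem _
  have hsorted : (PySem.List.sorted xs (fun x => x) false).Pairwise (fun a b => a ≤ b) := by
    simpa using PySem.List.sorted_pairwise xs (fun x => x)
  have hmem' : PySem.List.pyGetD xs i 0 ∈ PySem.List.sorted xs (fun x => x) false :=
    (PySem.List.mem_sorted xs (fun x => x) false _).mpr hmem
  rw [dict_loop_lookup _ 0 _ _ hsorted hmem', count_le_eq_sum,
      (PySem.List.sorted_perm xs (fun x => x) false).countP_eq, zero_add]
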